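-- pv_equiv track=rewrite | github.com/CMU15-112/lecture_demos_qatar | week9/groupByNumberOfDifferentLetters.py | groupByNumberOfDifferentLetters
-- ===== SOURCE A (Python) =====
-- def numberOfUniqueLetters(s):
--     myset = set()
--     for c in s:
--         myset.add(c)
--     return len(myset)
--
-- def groupByNumberOfDifferentLetters(L):
--     d = dict()
--     for w in L:
--         num = numberOfUniqueLetters(w)
--         if num in d:
--             d[num].add(w)
--         else:
--             d[num] = {w}
--     return d
-- ===== SOURCE B (Python) =====
-- def groupByNumberOfDifferentLetters(L):
--     keys = [len(set(w)) for w in L]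
--     return {k: {w for w, kw in zip(L, keys) if kw == k}
--             for k in dict.fromkeys(keys)}
-- ===== Notes on version B (the rewrite author's own statement) =====
-- stated objective: simpler
-- what changed: Replaces the incremental dict-accumulation loop (check key, mutate or create a set) by a two-pass declarative form: compute all keys once, then build the result in one dict comprehension over the distinct keys, collecting each group by filtering the zipped word/key list.
import Mathlib
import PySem

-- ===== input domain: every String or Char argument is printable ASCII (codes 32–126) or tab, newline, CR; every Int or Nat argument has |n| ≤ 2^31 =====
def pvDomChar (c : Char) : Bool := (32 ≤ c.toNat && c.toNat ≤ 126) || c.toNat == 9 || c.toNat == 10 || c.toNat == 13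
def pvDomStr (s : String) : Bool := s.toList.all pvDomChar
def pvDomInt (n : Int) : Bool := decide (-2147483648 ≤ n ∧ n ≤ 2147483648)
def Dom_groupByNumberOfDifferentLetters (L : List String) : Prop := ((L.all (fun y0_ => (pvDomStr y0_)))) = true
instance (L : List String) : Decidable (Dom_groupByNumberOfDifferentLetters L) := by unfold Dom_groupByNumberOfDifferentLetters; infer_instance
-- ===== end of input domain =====

-- B replaces A's incremental dict-accumulation loop by a two-pass declarative form (keys once,
-- then one comprehension over the distinct keys, each group collected by filtering); objective: simpler.

-- ===== PORT A =====
-- numberOfUniqueLetters: build a set from the characters, return its size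
def pvUniq (s : String) : Int :=
  ((s.toList.foldl (fun ms c => PySem.Set.add ms c) PySem.Set.empty).length : Int)

def groupByNumberOfDifferentLetters (L : List String) : List (Int × List String) :=
  (L.foldl (fun d w =>
      let num := pvUniq w
      if d.contains num then d.modify num PySem.Set.empty (fun s => PySem.Set.add s w)
      else d.insert num (PySem.Set.add PySem.Set.empty w))
    PySem.Dict.empty).items

-- ===== PORT B =====
-- len(set(w))
def pvKey (w : String) : Int := ((PySem.Set.ofList w.toList).length : Int)

def groupByNumberOfDifferentLetters_alt (L : List String) : List (Int × List String) :=
  let keys := L.map pvKey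
  (PySem.List.dedup keys).map (fun k =>
    (k, PySem.Set.ofList ((L.zip keys).filterMap (fun p => if p.2 = k then some p.1 else none))))

-- ===== PRECONDITION & SPEC =====
def Spec_groupByNumberOfDifferentLetters (L : List String) (out : List (Int × List String)) : Prop := out = groupByNumberOfDifferentLetters_alt L
instance (L : List String) (out : List (Int × List String)) : Decidable (Spec_groupByNumberOfDifferentLetters L out) := by unfold Spec_groupByNumberOfDifferentLetters; infer_instance

-- ===== CLAIM (what is proved, stated in full; the proofs are below) =====
def Claim_equal_groupByNumberOfDifferentLetters : Prop := ∀ (L : List String), Dom_groupByNumberOfDifferentLetters L → Spec_groupByNumberOfDifferentLetters L (groupByNumberOfDifferentLetters L)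

-- ===== LEMMAS AND PROOFS =====

-- A's per-character set fold is definitionally PySem.Set.ofList, so the two key functions agree.
theorem pvUniq_eq_pvKey : pvUniq = pvKey := rfl

-- A's if/else step (mutate the existing set, or create a fresh one) is exactly Dict.modify.
theorem pvStep_eq (d : PySem.Dict Int (PySem.Set String)) (k : Int) (w : String) :
    (if d.contains k then d.modify k PySem.Set.empty (fun s => PySem.Set.add s w)
     else d.insert k (PySem.Set.add PySem.Set.empty w))
      = d.modify k PySem.Set.empty (fun s => PySem.Set.add s w) := by
  split_ifs with h
  · rfl
  · simp [PySem.Dict.modify, PySem.Dict.getD_of_not_contains, h]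

-- B's zip-with-keys filterMap is just filtering L by the key predicate.
theorem pvZipFilter (L : List String) (k : Int) :
    ((L.zip (L.map pvKey)).filterMap (fun p => if p.2 = k then some p.1 else none))
      = L.filter (fun w => pvKey w == k) := by
  induction L with
  | nil => rfl
  | cons w t ih =>
    simp only [List.map_cons, List.zip_cons_cons, List.filterMap_cons, List.filter_cons, ih]
    by_cases h : pvKey w = k <;> simp [h]

-- The group stored at key k by the modify loop is the set of the words whose key is k.
theorem pvGetD_fold (L : List String) (d : PySem.Dict Int (PySem.Set String)) (k : Int) :
    ((L.foldl (fun d w => d.modify (pvKey w) PySem.Set.empty (fun s => PySem.Set.add s w)) d).getD k PySem.Set.empty)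
      = PySem.Set.update (d.getD k PySem.Set.empty) (L.filter (fun w => pvKey w == k)) := by
  induction L generalizing d with
  | nil => rfl
  | cons w t ih =>
    simp only [List.foldl_cons, List.filter_cons, ih]
    by_cases h : pvKey w = k
    · simp [h, PySem.Dict.getD_modify_self, PySem.Set.update]
    · rw [PySem.Dict.getD_modify_of_ne]
      · simp [h]
      · exact fun hh => h hh.symm

theorem pvMain (L : List String) : groupByNumberOfDifferentLetters L = groupByNumberOfDifferentLetters_alt L := by
  unfold groupByNumberOfDifferentLetters groupByNumberOfDifferentLetters_alt
  have hstep : (fun (d : PySem.Dict Int (PySem.Set String)) w =>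
      let num := pvUniq w
      if d.contains num then d.modify num PySem.Set.empty (fun s => PySem.Set.add s w)
      else d.insert num (PySem.Set.add PySem.Set.empty w))
      = fun d w => d.modify (pvKey w) PySem.Set.empty (fun s => PySem.Set.add s w) := by
    funext d w; rw [pvUniq_eq_pvKey]; exact pvStep_eq d (pvKey w) w
  rw [hstep]
  have hnd : (L.foldl (fun d w => d.modify (pvKey w) PySem.Set.empty (fun s => PySem.Set.add s w)) PySem.Dict.empty).keys.Nodup :=
    PySem.Dict.nodup_keys_foldl_modify_key L pvKey PySem.Set.empty (fun _ w s => PySem.Set.add s w) PySem.Dict.empty PySem.Dict.nodup_keys_empty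
  rw [PySem.Dict.items_eq_map_keys _ hnd PySem.Set.empty]
  rw [PySem.Dict.keys_foldl_modify_key L pvKey PySem.Set.empty (fun _ w s => PySem.Set.add s w)]
  simp only [pvZipFilter, PySem.List.dedup_eq_ofList]
  apply List.map_congr_left
  intro k _
  rw [pvGetD_fold]
  rfl

-- ===== VERDICT (by name: the statement is the Claim_ definition above) =====
theorem groupByNumberOfDifferentLetters_spec : Claim_equal_groupByNumberOfDifferentLetters := by
  intro L _
  exact pvMain L
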